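-- pv_equiv track=rewrite | github.com/duolingo/duolingo-sharedtask-2020 | utils.py | read_trans_prompts
-- ===== SOURCE A (Python) =====
-- from typing import Any, Dict, List, Set, Tuple
--
-- FIELDSEP = "|"
--
-- def read_trans_prompts(lines: List[str]) -> List[Tuple[str,str]]:
--     """
--     This reads a file in the shared task format, returns a list of Tuples containing ID and text for each prompt.
--     """
--
--     ids_prompts = []
--     first = True
--     for line in lines:
--         line = line.strip().lower()
--
--         # in a group, the first one is the KEY.
--         # all others are part of the set.
--         if len(line) == 0:
--             first = True
--         else:
--             if first:
--                 key, prompt = line.split(FIELDSEP)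
--                 ids_prompts.append((key, prompt))
--                 first = False
--
--     return ids_prompts
-- ===== SOURCE B (Python) =====
-- FIELDSEP = "|"
--
-- def _id_text(head):
--     key, prompt = head.split(FIELDSEP)
--     return (key, prompt)
--
-- def read_trans_prompts(lines):
--     """Stateless three-stage version: normalize every line, select the head of
--     each non-blank run by pairing each line with its predecessor (zip with a
--     shifted copy), and split each selected head into (id, text)."""
--     stripped = [l.strip().lower() for l in lines]
--     return [_id_text(s) for prev, s in zip([""] + stripped, stripped) if s and not prev]
-- ===== Notes on version B (the rewrite author's own statement) =====
-- stated objective: simpler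
-- what changed: Replaces A's stateful single pass with a carried 'first' flag by a stateless staged formulation: normalize all lines, detect run heads by zipping each line with its predecessor (shifted copy), and split the heads in a comprehension.
import Mathlib
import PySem

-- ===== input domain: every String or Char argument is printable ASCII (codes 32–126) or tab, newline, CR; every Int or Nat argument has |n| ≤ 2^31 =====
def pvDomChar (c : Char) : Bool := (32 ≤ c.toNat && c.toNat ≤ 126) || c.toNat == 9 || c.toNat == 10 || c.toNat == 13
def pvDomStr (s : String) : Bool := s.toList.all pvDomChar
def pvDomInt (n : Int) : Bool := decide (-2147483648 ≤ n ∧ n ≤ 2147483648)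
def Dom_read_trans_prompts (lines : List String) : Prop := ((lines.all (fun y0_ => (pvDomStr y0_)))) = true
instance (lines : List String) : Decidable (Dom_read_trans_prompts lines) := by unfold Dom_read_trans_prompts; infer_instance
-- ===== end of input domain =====

-- B replaces A's stateful single pass (carried 'first' flag) by a stateless staged
-- formulation: normalize, select run heads by zipping with the predecessor, split (simpler).

-- ===== PORT A =====
-- A's loop: state = (ids_prompts, first); a split with ≠ 2 parts is a Python ValueError,
-- excluded by Pre_ (the fold's value there is a harmless default).
def read_trans_prompts (lines : List String) : List (String × String) :=
  (lines.foldl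
    (fun (st : List (String × String) × Bool) line =>
      let l := PySem.Str.lower (PySem.Str.strip line)
      if PySem.Str.len l = 0 then (st.1, true)
      else if st.2 then
        match PySem.Str.split? l "|" with
        | some [key, prompt] => (st.1 ++ [(key, prompt)], false)
        | _ => (st.1 ++ [("", "")], false)   -- ValueError in Python; outside Pre_
      else st)
    ([], true)).1

-- ===== PORT B =====
-- _id_text: 'key, prompt = head.split(FIELDSEP)' — ValueError (outside Pre_) unless exactly 2 parts.
def pvIdText (head : String) : String × String :=
  match PySem.Str.split? head "|" with
  | none => ("", "")                 -- unreachable for nonempty "|"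
  | some parts =>
    match parts with
    | [] => ("", "")
    | [_] => ("", "")
    | key :: prompt :: [] => (key, prompt)
    | _ :: _ :: _ :: _ => ("", "")   -- ValueError in Python; outside Pre_

-- normalize; zip with shifted copy; keep (prev, s) with s truthy and prev falsy; split the heads
def read_trans_prompts_alt (lines : List String) : List (String × String) :=
  let stripped := lines.map (fun l => PySem.Str.lower (PySem.Str.strip l))
  ((("" :: stripped).zip stripped).filter
      (fun pr => !(pr.2 == "") && (pr.1 == ""))).map (fun pr => pvIdText pr.2)

-- ===== PRECONDITION & SPEC =====
-- Pre_ excludes exactly the inputs where Python raises ValueError: a line that starts a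
-- non-blank run (first line, or preceded by a blank-after-strip line) whose '|'-count is not 1.
def Pre_read_trans_prompts (lines : List String) : Prop :=
  ∀ i < lines.length,
    PySem.Str.len (PySem.Str.strip (lines.getD i "")) ≠ 0 →
    (i = 0 ∨ PySem.Str.len (PySem.Str.strip (lines.getD (i - 1) "")) = 0) →
    PySem.Str.count (lines.getD i "") "|" = 1
instance (lines : List String) : Decidable (Pre_read_trans_prompts lines) := by
  unfold Pre_read_trans_prompts; infer_instance

def pvWitness_read_trans_prompts : List String := ["en_1|Hello there", " extra", "", "EN_2|Bye"]

def Spec_read_trans_prompts (lines : List String) (out : List (String × String)) : Prop := out = read_trans_prompts_alt lines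
instance (lines : List String) (out : List (String × String)) : Decidable (Spec_read_trans_prompts lines out) := by unfold Spec_read_trans_prompts; infer_instance

-- ===== CLAIM (what is proved, stated in full; the proofs are below) =====
def Claim_equal_read_trans_prompts : Prop := ∀ (lines : List String), Dom_read_trans_prompts lines → Pre_read_trans_prompts lines → Spec_read_trans_prompts lines (read_trans_prompts lines)

-- ===== LEMMAS AND PROOFS =====

-- A's loop body, on an already-normalized line
def pvStepA (st : List (String × String) × Bool) (l : String) : List (String × String) × Bool :=
  if PySem.Str.len l = 0 then (st.1, true)
  else if st.2 then
    match PySem.Str.split? l "|" with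
    | some [key, prompt] => (st.1 ++ [(key, prompt)], false)
    | _ => (st.1 ++ [("", "")], false)
  else st

-- B's zip-filter-map expression, with the predecessor of the first element generalized
def pvZipSel (prev : String) (ms : List String) : List (String × String) :=
  (((prev :: ms).zip ms).filter (fun pr => !(pr.2 == "") && (pr.1 == ""))).map
    (fun pr => pvIdText pr.2)

theorem pvLen_zero_iff (l : String) : PySem.Str.len l = 0 ↔ l = "" := by
  rw [PySem.Str.len_eq]; simp

theorem pvZipSel_cons (prev m : String) (rest : List String) :
    pvZipSel prev (m :: rest)
      = (if (!(m == "") && (prev == "")) = true then [pvIdText m] else []) ++ pvZipSel m rest := by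
  simp only [pvZipSel, List.zip_cons_cons, List.filter_cons]
  split_ifs with h <;> simp

theorem pvStepA_append (l : String) (hl : ¬ PySem.Str.len l = 0) (acc : List (String × String)) :
    pvStepA (acc, true) l = (acc ++ [pvIdText l], false) := by
  simp only [pvStepA, if_neg hl, pvIdText]
  cases h : PySem.Str.split? l "|" with
  | none => simp
  | some parts =>
    cases parts with
    | nil => simp
    | cons a t => cases t with
      | nil => simp
      | cons b u => cases u <;> simp

theorem pvLoop_eq (ms : List String) : ∀ (prev : String) (acc : List (String × String)),
    (ms.foldl pvStepA (acc, prev == "")).1 = acc ++ pvZipSel prev ms := by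
  induction ms with
  | nil => intro prev acc; simp [pvZipSel]
  | cons m rest ih =>
    intro prev acc
    rw [List.foldl_cons, pvZipSel_cons]
    by_cases hm : PySem.Str.len m = 0
    · have hm' : m = "" := (pvLen_zero_iff m).mp hm
      have hst : pvStepA (acc, (prev == "")) m = (acc, (m == "")) := by
        simp [pvStepA, hm']
      rw [hst, ih m acc]
      simp [hm']
    · have hm' : ¬ m = "" := fun h => hm ((pvLen_zero_iff m).mpr h)
      by_cases hp : prev = ""
      · have hst : pvStepA (acc, (prev == "")) m = (acc ++ [pvIdText m], (m == "")) := by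
          rw [show (prev == "") = true from beq_iff_eq.mpr hp, show (m == "") = false from beq_eq_false_iff_ne.mpr hm']
          exact pvStepA_append m hm acc
        rw [hst, ih m (acc ++ [pvIdText m])]
        simp [hp, hm']
      · have hst : pvStepA (acc, (prev == "")) m = (acc, (m == "")) := by
          rw [show (prev == "") = false from beq_eq_false_iff_ne.mpr hp, show (m == "") = false from beq_eq_false_iff_ne.mpr hm']
          simp [pvStepA]
          exact hm'
        rw [hst, ih m acc]
        simp [hp]

-- ===== VERDICT (by name: the statement is the Claim_ definition above) =====
theorem read_trans_prompts_spec : Claim_equal_read_trans_prompts := by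
  intro lines _ _
  unfold Spec_read_trans_prompts read_trans_prompts read_trans_prompts_alt
  have h : lines.foldl
      (fun (st : List (String × String) × Bool) line =>
        let l := PySem.Str.lower (PySem.Str.strip line)
        if PySem.Str.len l = 0 then (st.1, true)
        else if st.2 then
          match PySem.Str.split? l "|" with
          | some [key, prompt] => (st.1 ++ [(key, prompt)], false)
          | _ => (st.1 ++ [("", "")], false)
        else st)
      ([], true)
      = (lines.map (fun l => PySem.Str.lower (PySem.Str.strip l))).foldl pvStepA ([], true) := by
    rw [List.foldl_map]
    rfl
  have htrue : (true : Bool) = ("" == "") := by decide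
  rw [h, htrue, pvLoop_eq _ "" []]
  rfl
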